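-- pv_equiv track=rewrite | github.com/andrewerf/geotagging_project | clustering_analysis.py | get_unic_labels
-- ===== SOURCE A (Python) =====
-- def get_unic_labels(labels):
--     unic_labels = list()
--     for val in labels:
--         if not val in unic_labels:
--             unic_labels.append(val)
--     unic_labels.sort()
--     unic_labels.pop(0)
--     return unic_labels
-- ===== SOURCE B (Python) =====
-- def get_unic_labels(labels):
--     s = sorted(labels)
--     unic_labels = []
--     for v in s:
--         if not unic_labels or unic_labels[-1] != v:
--             unic_labels.append(v)
--     unic_labels.pop(0)
--     return unic_labels
-- ===== Notes on version B (the rewrite author's own statement) =====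
-- stated objective: faster
-- what changed: sort first, then remove adjacent duplicates in one linear pass, instead of O(n^2) first-occurrence dedup by membership scan followed by a sort
import Mathlib
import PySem

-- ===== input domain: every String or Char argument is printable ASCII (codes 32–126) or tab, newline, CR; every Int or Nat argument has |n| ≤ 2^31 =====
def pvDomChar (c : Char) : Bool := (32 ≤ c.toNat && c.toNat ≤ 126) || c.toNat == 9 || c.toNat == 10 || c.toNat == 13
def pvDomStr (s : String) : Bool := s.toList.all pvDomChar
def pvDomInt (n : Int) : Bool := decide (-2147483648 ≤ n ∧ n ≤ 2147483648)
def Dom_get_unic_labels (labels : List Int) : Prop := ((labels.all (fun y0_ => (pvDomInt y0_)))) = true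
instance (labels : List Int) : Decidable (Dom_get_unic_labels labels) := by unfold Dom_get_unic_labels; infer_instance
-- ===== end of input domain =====

-- B sorts first and drops adjacent duplicates in one linear pass instead of A's
-- quadratic membership-scan dedup followed by a sort (return value only).

-- ===== PORT A =====
def get_unic_labels (labels : List Int) : List Int :=
  let unic := labels.foldl (fun acc val => if val ∈ acc then acc else acc ++ [val]) []
  let s := PySem.List.sorted unic (fun x => x) false
  match PySem.List.pop? s 0 with
  | some (_, rest) => rest
  | none => []   -- IndexError in Python; excluded by Pre_

-- ===== PORT B =====
def get_unic_labels_alt (labels : List Int) : List Int :=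
  let s := PySem.List.sorted labels (fun x => x) false
  let unic := s.foldl (fun acc v => if acc.getLast? ≠ some v then acc ++ [v] else acc) []
  match PySem.List.pop? unic 0 with
  | some (_, rest) => rest
  | none => []   -- IndexError in Python; excluded by Pre_

-- ===== PRECONDITION & SPEC =====
-- Both programs raise IndexError (pop(0) on an empty list) on the empty input; Pre_ excludes it.
def Pre_get_unic_labels (labels : List Int) : Prop := labels ≠ []
instance (labels : List Int) : Decidable (Pre_get_unic_labels labels) := by
  unfold Pre_get_unic_labels; infer_instance

def pvWitness_get_unic_labels : List Int := [3, 1, 3, 2]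

def Spec_get_unic_labels (labels : List Int) (out : List Int) : Prop := out = get_unic_labels_alt labels
instance (labels : List Int) (out : List Int) : Decidable (Spec_get_unic_labels labels out) := by unfold Spec_get_unic_labels; infer_instance

-- ===== CLAIM (what is proved, stated in full; the proofs are below) =====
def Claim_equal_get_unic_labels : Prop := ∀ (labels : List Int), Dom_get_unic_labels labels → Pre_get_unic_labels labels → Spec_get_unic_labels labels (get_unic_labels labels)

-- ===== LEMMAS AND PROOFS =====

-- A's accumulator: nodup, membership = acc ∪ input.
theorem dedupA_spec (l acc : List Int) (hn : acc.Nodup) :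
    (l.foldl (fun acc val => if val ∈ acc then acc else acc ++ [val]) acc).Nodup ∧
    (∀ x, x ∈ l.foldl (fun acc val => if val ∈ acc then acc else acc ++ [val]) acc ↔
          x ∈ acc ∨ x ∈ l) := by
  induction l generalizing acc with
  | nil => simpa using hn
  | cons v t ih =>
    by_cases hv : v ∈ acc
    · simp only [List.foldl_cons, if_pos hv]
      obtain ⟨h1, h2⟩ := ih acc hn
      refine ⟨h1, fun x => ?_⟩
      rw [h2]
      constructor
      · rintro (h | h) <;> simp [*]
      · rintro (h | h)
        · exact Or.inl h
        · rcases List.mem_cons.mp h with rfl | h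
          · exact Or.inl hv
          · exact Or.inr h
    · simp only [List.foldl_cons, if_neg hv]
      have hn' : (acc ++ [v]).Nodup := by
        rw [List.nodup_append]
        refine ⟨hn, List.nodup_singleton _, ?_⟩
        intro a ha b hb
        simp only [List.mem_singleton] at hb
        subst hb
        exact fun h => hv (h ▸ ha)
      obtain ⟨h1, h2⟩ := ih (acc ++ [v]) hn'
      refine ⟨h1, fun x => ?_⟩
      rw [h2]
      simp only [List.mem_append, List.mem_cons]
      tauto

-- B's accumulator over a ≤-sorted remainder: strictly increasing, membership = acc ∪ input.
theorem adjDedup_main (s : List Int) (acc : List Int)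
    (hacc : acc.Pairwise (· < ·))
    (hs : s.Pairwise (· ≤ ·))
    (hle : ∀ a ∈ acc, ∀ v ∈ s, a ≤ v) :
    (s.foldl (fun acc v => if acc.getLast? ≠ some v then acc ++ [v] else acc) acc).Pairwise (· < ·) ∧
    (∀ x, x ∈ s.foldl (fun acc v => if acc.getLast? ≠ some v then acc ++ [v] else acc) acc ↔
          x ∈ acc ∨ x ∈ s) := by
  induction s generalizing acc with
  | nil => simpa using hacc
  | cons v t ih =>
    have hvt : ∀ w ∈ t, v ≤ w := fun w hw => (List.pairwise_cons.mp hs).1 w hw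
    have ht : t.Pairwise (· ≤ ·) := (List.pairwise_cons.mp hs).2
    by_cases hg : acc.getLast? = some v
    · -- duplicate of the last appended element: skipped
      have hvmem : v ∈ acc := List.mem_of_getLast? hg
      have hstep : (if acc.getLast? ≠ some v then acc ++ [v] else acc) = acc := by simp [hg]
      rw [List.foldl_cons, hstep]
      obtain ⟨h1, h2⟩ := ih acc hacc ht (fun a ha w hw => hle a ha w (List.mem_cons_of_mem _ hw))
      refine ⟨h1, fun x => ?_⟩
      rw [h2]
      constructor
      · rintro (h | h) <;> simp [*]
      · rintro (h | h)
        · exact Or.inl h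
        · rcases List.mem_cons.mp h with rfl | h
          · exact Or.inl hvmem
          · exact Or.inr h
    · -- new value: appended
      have hstep : (if acc.getLast? ≠ some v then acc ++ [v] else acc) = acc ++ [v] := by simp [hg]
      have hlt : ∀ a ∈ acc, a < v := by
        intro a ha
        rcases lt_or_eq_of_le (hle a ha v (List.mem_cons_self ..)) with h | h
        · exact h
        · exfalso
          -- a = v ∈ acc, but getLast? acc ≠ some v: the last m of acc has a ≤ m ≤ v, so m = v
          have hne : acc ≠ [] := List.ne_nil_of_mem ha
          obtain ⟨m, hm⟩ : ∃ m, acc.getLast? = some m := by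
            cases hg' : acc.getLast? with
            | none => exact absurd (List.getLast?_eq_none_iff.mp hg') hne
            | some m => exact ⟨m, rfl⟩
          obtain ⟨ys, hys⟩ := List.getLast?_eq_some_iff.mp hm
          have hmv : m ≤ v := hle m (List.mem_of_getLast? hm) v (List.mem_cons_self ..)
          have ham : a ≤ m := by
            subst hys
            rcases List.mem_append.mp ha with h' | h'
            · have := (List.pairwise_append.mp hacc).2.2 a h' m (by simp)
              exact le_of_lt this
            · simp at h'; subst h'; rfl
          have : m = v := le_antisymm hmv (h ▸ ham)
          exact hg (this ▸ hm)
      have hacc' : (acc ++ [v]).Pairwise (· < ·) := by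
        rw [List.pairwise_append]
        exact ⟨hacc, List.pairwise_singleton _ _, fun a ha b hb => by
          simp at hb; subst hb; exact hlt a ha⟩
      have hle' : ∀ a ∈ acc ++ [v], ∀ w ∈ t, a ≤ w := by
        intro a ha w hw
        rcases List.mem_append.mp ha with h | h
        · exact hle a h w (List.mem_cons_of_mem _ hw)
        · simp at h; subst h; exact hvt w hw
      rw [List.foldl_cons, hstep]
      obtain ⟨h1, h2⟩ := ih (acc ++ [v]) hacc' ht hle'
      refine ⟨h1, fun x => ?_⟩
      rw [h2]
      simp only [List.mem_append, List.mem_cons]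
      tauto

-- The two intermediate lists agree: sorted(first-occurrence dedup) = adjacent-dedup(sorted).
theorem lists_agree (labels : List Int) :
    PySem.List.sorted (labels.foldl (fun acc val => if val ∈ acc then acc else acc ++ [val]) []) (fun x => x) false
      = (PySem.List.sorted labels (fun x => x) false).foldl
          (fun acc v => if acc.getLast? ≠ some v then acc ++ [v] else acc) [] := by
  set dA := labels.foldl (fun acc val => if val ∈ acc then acc else acc ++ [val]) [] with hdA
  set s := PySem.List.sorted labels (fun x => x) false with hsdef
  set ys := s.foldl (fun acc v => if acc.getLast? ≠ some v then acc ++ [v] else acc) [] with hys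
  obtain ⟨hAnodup, hAmem⟩ := dedupA_spec labels [] List.nodup_nil
  have hspair : s.Pairwise (· ≤ ·) := by
    have := PySem.List.sorted_pairwise (xs := labels) (key := fun x => x)
    simpa using this
  obtain ⟨hBpair, hBmem⟩ := adjDedup_main s [] List.Pairwise.nil hspair (by simp)
  have hBnodup : ys.Nodup := hBpair.imp ne_of_lt
  have hperm : ys.Perm dA := by
    rw [List.perm_ext_iff_of_nodup hBnodup hAnodup]
    intro x
    rw [hBmem x, hAmem x]
    simp [hsdef, PySem.List.mem_sorted]
  exact PySem.List.sorted_eq_of_perm_of_pairwise_lt dA ys (fun x => x) hperm (by rw [hys]; exact hBpair)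

-- ===== VERDICT (by name: the statement is the Claim_ definition above) =====
theorem get_unic_labels_spec : Claim_equal_get_unic_labels := by
  intro labels _ _
  show get_unic_labels labels = get_unic_labels_alt labels
  simp only [get_unic_labels, get_unic_labels_alt]
  rw [lists_agree labels]
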